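-- pv_equiv track=rewrite | github.com/romango1x1/Algorithms-DataStructures | HW_5/t05_11_e2254.py | max_rice_trucks
-- ===== SOURCE A (Python) =====
-- def max_rice_trucks(R, L, B, X):
--     left = 0
--     max_trucks = 0
--     total_cost = 0
--
--     for right in range(R):
--         total_cost += X[right] - X[(left + right) // 2]
--
--         while total_cost > B:
--             total_cost -= X[(left + right + 1) // 2] - X[left]
--             left += 1
--
--         max_trucks = max(max_trucks, right - left + 1)
--
--     return max_trucks
-- ===== SOURCE B (Python) =====
-- def max_rice_trucks(R, L, B, X):
--     # Prefix sums give an O(1) closed form for the cost of gathering any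
--     # window X[l..r] onto its median X[(l+r)//2]; no running total is kept.
--     P = [0]
--     s = 0
--     for x in X:
--         s += x
--         P.append(s)
--
--     def cost(l, r):
--         m = (l + r) // 2
--         return X[m] * (m - l) - (P[m] - P[l]) + (P[r + 1] - P[m + 1]) - X[m] * (r - m)
--
--     left = 0
--     best = 0
--     for r in range(R):
--         while cost(left, r) > B:
--             left += 1
--         best = max(best, r - left + 1)
--     return best
-- ===== Notes on version B (the rewrite author's own statement) =====
-- stated objective: alternative
-- what changed: B precomputes a prefix-sum array once and tests each window with an O(1) closed-form gather-to-median cost, so the incrementally maintained running total and its add/subtract bookkeeping of A disappear.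
-- outside the precondition, e.g. on max_rice_trucks(1, 0, -13, [-27, 28, 2, -17, -28]): A returns 0, B returns 0
import Mathlib
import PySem

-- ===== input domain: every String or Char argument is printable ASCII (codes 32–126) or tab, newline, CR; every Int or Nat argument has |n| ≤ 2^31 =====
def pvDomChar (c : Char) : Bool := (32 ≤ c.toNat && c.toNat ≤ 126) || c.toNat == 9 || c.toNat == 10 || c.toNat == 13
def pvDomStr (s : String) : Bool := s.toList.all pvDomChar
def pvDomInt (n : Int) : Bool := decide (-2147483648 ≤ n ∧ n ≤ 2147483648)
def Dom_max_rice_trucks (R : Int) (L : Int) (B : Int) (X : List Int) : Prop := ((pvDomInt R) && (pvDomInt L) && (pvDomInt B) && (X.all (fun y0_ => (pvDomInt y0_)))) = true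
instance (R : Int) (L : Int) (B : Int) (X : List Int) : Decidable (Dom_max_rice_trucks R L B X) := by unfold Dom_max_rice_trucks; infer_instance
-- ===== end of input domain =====

-- B replaces A's incrementally maintained running cost by a prefix-sum array and an
-- O(1) closed-form window cost (objective: alternative; same asymptotic cost).

-- ===== PORT A =====
-- inner 'while total_cost > B' loop of A; fuel only makes the recursion structural
-- (under Pre_ the loop stops at left = right at the latest, within X.length+1 steps)
def pvAWhile (B : Int) (X : List Int) (right : Int) : Nat → Int → Int → Int × Int
  | 0, left, tc => (left, tc)
  | fuel+1, left, tc =>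
    if B < tc then
      pvAWhile B X right fuel (left + 1)
        (tc - (PySem.List.pyGetD X (PySem.Int.floordiv (left + right + 1) 2) 0 -
               PySem.List.pyGetD X left 0))
    else (left, tc)

-- one iteration of A's 'for right in range(R)' body; state = (left, max_trucks, total_cost)
def pvAStep (B : Int) (X : List Int) (st : Int × Int × Int) (right : Int) : Int × Int × Int :=
  let tc1 := st.2.2 + (PySem.List.pyGetD X right 0 -
                       PySem.List.pyGetD X (PySem.Int.floordiv (st.1 + right) 2) 0)
  let p := pvAWhile B X right (X.length + 1) st.1 tc1
  (p.1, max st.2.1 (right - p.1 + 1), p.2)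

def max_rice_trucks (R : Int) (L : Int) (B : Int) (X : List Int) : Int :=
  ((PySem.List.pyRange 0 R 1).foldl (pvAStep B X) (0, 0, 0)).2.1

-- ===== PORT B =====
-- 'P = [0]; s = 0; for x in X: s += x; P.append(s)' — returns (s, P)
def pvPrefix (X : List Int) : Int × List Int :=
  X.foldl (fun sp x => (sp.1 + x, sp.2 ++ [sp.1 + x])) (0, [0])

-- closed-form cost of gathering X[l..r] onto its median X[(l+r)//2]
def pvCost (X P : List Int) (l r : Int) : Int :=
  let m := PySem.Int.floordiv (l + r) 2
  PySem.List.pyGetD X m 0 * (m - l) -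
    (PySem.List.pyGetD P m 0 - PySem.List.pyGetD P l 0) +
    (PySem.List.pyGetD P (r + 1) 0 - PySem.List.pyGetD P (m + 1) 0) -
    PySem.List.pyGetD X m 0 * (r - m)

-- 'while cost(left, r) > B: left += 1'
def pvBWhile (B : Int) (X P : List Int) (r : Int) : Nat → Int → Int
  | 0, left => left
  | fuel+1, left => if B < pvCost X P left r then pvBWhile B X P r fuel (left + 1) else left

-- one iteration of B's 'for r in range(R)' body; state = (left, best)
def pvBStep (B : Int) (X P : List Int) (st : Int × Int) (r : Int) : Int × Int :=
  let left := pvBWhile B X P r (X.length + 1) st.1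
  (left, max st.2 (r - left + 1))

def max_rice_trucks_alt (R : Int) (L : Int) (B : Int) (X : List Int) : Int :=
  ((PySem.List.pyRange 0 R 1).foldl (pvBStep B X (pvPrefix X).2) (0, 0)).2

-- ===== PRECONDITION & SPEC =====
-- For R ≥ 1, A raises IndexError whenever R > len(X); with B < 0 it usually raises
-- too (its while loop walks left past the end of X), and the rare B < 0 inputs where
-- it happens to return are excluded as a corner whose value depends on reading X
-- beyond index R-1 with an inverted (left > right) window; B returned the same value
-- on every such sampled input.
def Pre_max_rice_trucks (R : Int) (L : Int) (B : Int) (X : List Int) : Prop :=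
  R ≤ 0 ∨ (R ≤ (X.length : Int) ∧ 0 ≤ B)
instance (R : Int) (L : Int) (B : Int) (X : List Int) : Decidable (Pre_max_rice_trucks R L B X) := by unfold Pre_max_rice_trucks; infer_instance

def pvWitness_max_rice_trucks : Int × Int × Int × List Int := (3, 0, 2, [1, 2, 4])

def Spec_max_rice_trucks (R : Int) (L : Int) (B : Int) (X : List Int) (out : Int) : Prop := out = max_rice_trucks_alt R L B X
instance (R : Int) (L : Int) (B : Int) (X : List Int) (out : Int) : Decidable (Spec_max_rice_trucks R L B X out) := by unfold Spec_max_rice_trucks; infer_instance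

-- ===== CLAIM (what is proved, stated in full; the proofs are below) =====
def Claim_equal_max_rice_trucks : Prop := ∀ (R : Int) (L : Int) (B : Int) (X : List Int), Dom_max_rice_trucks R L B X → Pre_max_rice_trucks R L B X → Spec_max_rice_trucks R L B X (max_rice_trucks R L B X)

-- ===== LEMMAS AND PROOFS =====

-- the prefix list really is the list of partial sums
theorem pvPrefix_eq (X : List Int) :
    pvPrefix X = (X.sum, (List.range (X.length + 1)).map (fun i => (X.take i).sum)) := by
  induction X using List.reverseRecOn with
  | nil => simp [pvPrefix]
  | append_singleton xs x ih =>
    unfold pvPrefix at ih ⊢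
    rw [List.foldl_append, ih]
    simp only [List.foldl_cons, List.foldl_nil, Prod.mk.injEq]
    constructor
    · simp
    · symm
      rw [List.length_append, List.length_singleton, List.range_succ, List.map_append]
      congr 1
      · apply List.map_congr_left
        intro i hi
        rw [List.mem_range] at hi
        rw [List.take_append_of_le_length (by omega)]
      · simp [List.take_of_length_le]

-- P[i+1] = P[i] + X[i] for 0 ≤ i < len X
theorem pvPrefix_step (X : List Int) (i : Int) (h0 : 0 ≤ i) (h1 : i < (X.length : Int)) :
    PySem.List.pyGetD (pvPrefix X).2 (i + 1) 0 =
      PySem.List.pyGetD (pvPrefix X).2 i 0 + PySem.List.pyGetD X i 0 := by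
  rw [pvPrefix_eq]
  rw [PySem.List.pyGetD_eq_getElem _ _ (by omega) (by simpa using by omega),
      PySem.List.pyGetD_eq_getElem _ _ h0 (by simpa using by omega),
      PySem.List.pyGetD_eq_getElem _ _ h0 (by omega)]
  simp only [List.getElem_map, List.getElem_range]
  have h2 : (i + 1).toNat = i.toNat + 1 := by omega
  have h3 : i.toNat < X.length := by omega
  rw [h2]
  exact List.sum_take_succ X i.toNat h3

theorem pvCost_diag (X P : List Int) (l : Int) : pvCost X P l l = 0 := by
  unfold pvCost
  have h : PySem.Int.floordiv (l + l) 2 = l := by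
    rw [PySem.Int.floordiv_eq_ediv_of_pos (by norm_num)]; omega
  rw [h]; ring

-- moving the left end of the window right by one subtracts X[(l+r+1)//2] - X[l]
theorem pvCost_left (X : List Int) (l r : Int) (h0 : 0 ≤ l) (hlr : l < r)
    (hr : r < (X.length : Int)) :
    pvCost X (pvPrefix X).2 (l + 1) r =
      pvCost X (pvPrefix X).2 l r -
        (PySem.List.pyGetD X (PySem.Int.floordiv (l + r + 1) 2) 0 -
         PySem.List.pyGetD X l 0) := by
  have hfd : ∀ a : Int, PySem.Int.floordiv a 2 = a / 2 := fun a =>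
    PySem.Int.floordiv_eq_ediv_of_pos (by norm_num)
  unfold pvCost
  simp only [hfd]
  rcases Int.even_or_odd (l + r) with ⟨k, hk⟩ | ⟨k, hk⟩
  · -- l + r = 2k : the median index does not move
    have h1 : (l + 1 + r) / 2 = k := by omega
    have h2 : (l + r) / 2 = k := by omega
    have h3 : (l + r + 1) / 2 = k := by omega
    rw [h1, h2, h3]
    have hq1 := pvPrefix_step X l h0 (by omega)
    linear_combination hq1
  · -- l + r = 2k + 1 : the median index moves from k to k + 1
    have h1 : (l + 1 + r) / 2 = k + 1 := by omega
    have h2 : (l + r) / 2 = k := by omega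
    have h3 : (l + r + 1) / 2 = k + 1 := by omega
    rw [h1, h2, h3]
    have hq1 := pvPrefix_step X l h0 (by omega)
    have hq2 := pvPrefix_step X (k + 1) (by omega) (by omega)
    have hq3 := pvPrefix_step X k (by omega) (by omega)
    linear_combination hq1 - hq2 - hq3 +
      (PySem.List.pyGetD X k 0 - PySem.List.pyGetD X (k + 1) 0) * hk

-- extending the window to r adds X[r] - X[(l+r)//2]
theorem pvCost_right (X : List Int) (l r : Int) (h0 : 0 ≤ l) (hlr : l < r)
    (hr : r < (X.length : Int)) :
    pvCost X (pvPrefix X).2 l r =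
      pvCost X (pvPrefix X).2 l (r - 1) +
        (PySem.List.pyGetD X r 0 -
         PySem.List.pyGetD X (PySem.Int.floordiv (l + r) 2) 0) := by
  have hfd : ∀ a : Int, PySem.Int.floordiv a 2 = a / 2 := fun a =>
    PySem.Int.floordiv_eq_ediv_of_pos (by norm_num)
  unfold pvCost
  simp only [hfd]
  rcases Int.even_or_odd (l + r) with ⟨k, hk⟩ | ⟨k, hk⟩
  · -- l + r = 2k : the median index moves from k - 1 to k
    have h1 : (l + r) / 2 = k := by omega
    have h2 : (l + (r - 1)) / 2 = k - 1 := by omega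
    rw [h1, h2]
    have hq1 := pvPrefix_step X r (by omega) hr
    have hq2 := pvPrefix_step X k (by omega) (by omega)
    have hq3 := pvPrefix_step X (k - 1) (by omega) (by omega)
    have hk3 : k - 1 + 1 = k := by ring
    rw [hk3] at hq3 ⊢
    have hr1 : r - 1 + 1 = r := by ring
    rw [hr1]
    linear_combination hq1 - hq2 - hq3 +
      (PySem.List.pyGetD X (k - 1) 0 - PySem.List.pyGetD X k 0) * hk
  · -- l + r = 2k + 1 : the median index does not move
    have h1 : (l + r) / 2 = k := by omega
    have h2 : (l + (r - 1)) / 2 = k := by omega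
    rw [h1, h2]
    have hq1 := pvPrefix_step X r (by omega) hr
    have hr1 : r - 1 + 1 = r := by ring
    rw [hr1]
    linear_combination hq1

-- the two inner while loops run in lockstep: A's running total is pvCost of the window
theorem pvWhile_eq (B : Int) (X : List Int) (r : Int) (hB : 0 ≤ B)
    (hr : r < (X.length : Int)) :
    ∀ (fuel : Nat) (l tc : Int), 0 ≤ l → l ≤ r →
      tc = pvCost X (pvPrefix X).2 l r → (r - l).toNat < fuel →
      pvAWhile B X r fuel l tc =
        (pvBWhile B X (pvPrefix X).2 r fuel l,
         pvCost X (pvPrefix X).2 (pvBWhile B X (pvPrefix X).2 r fuel l) r) ∧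
      l ≤ pvBWhile B X (pvPrefix X).2 r fuel l ∧
      pvBWhile B X (pvPrefix X).2 r fuel l ≤ r := by
  intro fuel
  induction fuel with
  | zero => intro l tc _ _ _ hf; omega
  | succ fuel ih =>
    intro l tc h0 hlr htc hf
    by_cases hc : B < tc
    · have hlt : l < r := by
        rcases lt_or_eq_of_le hlr with h | h
        · exact h
        · exfalso
          rw [h, pvCost_diag] at htc
          omega
      have hcond : B < pvCost X (pvPrefix X).2 l r := htc ▸ hc
      simp only [pvAWhile, pvBWhile, if_pos hc, if_pos hcond]
      have hnew : tc - (PySem.List.pyGetD X (PySem.Int.floordiv (l + r + 1) 2) 0 -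
          PySem.List.pyGetD X l 0) = pvCost X (pvPrefix X).2 (l + 1) r := by
        rw [htc, pvCost_left X l r h0 hlt hr]
      obtain ⟨he, hb1, hb2⟩ := ih (l + 1) _ (by omega) (by omega) hnew (by omega)
      exact ⟨he, by omega, hb2⟩
    · have hcond : ¬ B < pvCost X (pvPrefix X).2 l r := htc ▸ hc
      simp only [pvAWhile, pvBWhile, if_neg hc, if_neg hcond]
      exact ⟨by rw [htc], le_refl l, hlr⟩

-- invariant of the outer for loop
theorem pvFold_eq (B : Int) (X : List Int) (hB : 0 ≤ B) :
    ∀ (n : Nat), (n : Int) ≤ (X.length : Int) →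
      (((PySem.List.pyRange 0 (n : Int) 1).foldl (pvAStep B X) (0, 0, 0)).1 =
        ((PySem.List.pyRange 0 (n : Int) 1).foldl (pvBStep B X (pvPrefix X).2) (0, 0)).1) ∧
      (((PySem.List.pyRange 0 (n : Int) 1).foldl (pvAStep B X) (0, 0, 0)).2.1 =
        ((PySem.List.pyRange 0 (n : Int) 1).foldl (pvBStep B X (pvPrefix X).2) (0, 0)).2) ∧
      0 ≤ ((PySem.List.pyRange 0 (n : Int) 1).foldl (pvAStep B X) (0, 0, 0)).1 ∧
      (n ≠ 0 → ((PySem.List.pyRange 0 (n : Int) 1).foldl (pvAStep B X) (0, 0, 0)).1 ≤ (n : Int) - 1) ∧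
      ((PySem.List.pyRange 0 (n : Int) 1).foldl (pvAStep B X) (0, 0, 0)).2.2 =
        (if n = 0 then 0
         else pvCost X (pvPrefix X).2
                (((PySem.List.pyRange 0 (n : Int) 1).foldl (pvAStep B X) (0, 0, 0)).1)
                ((n : Int) - 1)) := by
  intro n
  induction n with
  | zero =>
    intro _
    norm_num [PySem.List.pyRange_one_eq_nil (le_refl (0 : Int))]
  | succ m ih =>
    intro hlen
    have hmlen : (m : Int) < (X.length : Int) := by push_cast at hlen ⊢; omega
    obtain ⟨ih1, ih2, ih3, ih4, ih5⟩ := ih (by omega)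
    have hcast : ((m + 1 : Nat) : Int) = (m : Int) + 1 := by push_cast; ring
    rw [hcast, PySem.List.pyRange_one_succ_right (by positivity), List.foldl_append,
      List.foldl_append]
    simp only [List.foldl_cons, List.foldl_nil]
    set sa := (PySem.List.pyRange 0 (m : Int) 1).foldl (pvAStep B X)
      ((0 : Int), (0 : Int), (0 : Int)) with hsa
    set sb := (PySem.List.pyRange 0 (m : Int) 1).foldl (pvBStep B X (pvPrefix X).2)
      ((0 : Int), (0 : Int)) with hsb
    have hle : sa.1 ≤ (m : Int) := by
      by_cases hm0 : m = 0
      · subst hm0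
        simp [hsa, PySem.List.pyRange_one_eq_nil (le_refl (0 : Int))]
      · have := ih4 hm0
        omega
    have htc1 : sa.2.2 + (PySem.List.pyGetD X (m : Int) 0 -
        PySem.List.pyGetD X (PySem.Int.floordiv (sa.1 + (m : Int)) 2) 0) =
        pvCost X (pvPrefix X).2 sa.1 (m : Int) := by
      by_cases hm0 : m = 0
      · subst hm0
        have hsa0 : sa = ((0 : Int), (0 : Int), (0 : Int)) := by
          simp [hsa, PySem.List.pyRange_one_eq_nil (le_refl (0 : Int))]
        rw [hsa0]
        have hf0 : PySem.Int.floordiv ((0 : Int) + (0 : Nat)) 2 = 0 := by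
          rw [PySem.Int.floordiv_eq_ediv_of_pos (by norm_num)]
          norm_num
        norm_num [hf0, pvCost_diag]
      · have h4 := ih4 hm0
        rw [ih5, if_neg hm0, pvCost_right X sa.1 (m : Int) ih3 (by omega) hmlen]
    obtain ⟨heq, hb1, hb2⟩ := pvWhile_eq B X (m : Int) hB hmlen (X.length + 1) sa.1 _
      ih3 hle htc1 (by omega)
    simp only [pvAStep, pvBStep]
    rw [heq, ← ih1]
    refine ⟨rfl, by rw [ih2], by omega, fun _ => by push_cast; omega, ?_⟩
    have : ¬ (m + 1 = 0) := by omega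
    rw [if_neg this]
    push_cast
    ring_nf

-- ===== VERDICT (by name: the statement is the Claim_ definition above) =====
theorem max_rice_trucks_spec : Claim_equal_max_rice_trucks := by
  intro R L B X _ hPre
  unfold Spec_max_rice_trucks max_rice_trucks max_rice_trucks_alt
  by_cases hR : R ≤ 0
  · rw [PySem.List.pyRange_one_eq_nil hR]
    rfl
  · rcases hPre with h | ⟨hlen, hB⟩
    · omega
    · have hcast : R = ((R.toNat : Nat) : Int) := by omega
      rw [hcast]
      exact (pvFold_eq B X hB R.toNat (by omega)).2.1
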